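-- pv_equiv track=rewrite | github.com/KevinTsai18/Programacion-1 | tp3/tp3 ej2 b.py | funcion2b
-- ===== SOURCE A (Python) =====
-- def funcion2b(cant=4):
--     n=cant
--     matriz=[]
--     i=n-1
--     for f in range(n):
--         matriz.append([])
--         for c in range(n):
--             if c==i:
--                 matriz[f].append(3**(n-1)//3**(f))
--             else:
--                 matriz[f].append(0)
--         i=i-1
--     return matriz
-- ===== SOURCE B (Python) =====
-- def funcion2b(cant=4):
--     n = cant
--     abajo_arriba = []
--     p = 1
--     for c in range(n):
--         abajo_arriba.append([0] * c + [p] + [0] * (n - 1 - c))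
--         p *= 3
--     return abajo_arriba[::-1]
-- ===== Notes on version B (the rewrite author's own statement) =====
-- stated objective: alternative
-- what changed: Instead of scanning each cell with a branch and computing 3**(n-1)//3**f per row, B builds the rows bottom-up as concatenations of zero blocks around a running power accumulator p (p *= 3 each step, no exponentiation), then reverses the row list once.
import Mathlib
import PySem

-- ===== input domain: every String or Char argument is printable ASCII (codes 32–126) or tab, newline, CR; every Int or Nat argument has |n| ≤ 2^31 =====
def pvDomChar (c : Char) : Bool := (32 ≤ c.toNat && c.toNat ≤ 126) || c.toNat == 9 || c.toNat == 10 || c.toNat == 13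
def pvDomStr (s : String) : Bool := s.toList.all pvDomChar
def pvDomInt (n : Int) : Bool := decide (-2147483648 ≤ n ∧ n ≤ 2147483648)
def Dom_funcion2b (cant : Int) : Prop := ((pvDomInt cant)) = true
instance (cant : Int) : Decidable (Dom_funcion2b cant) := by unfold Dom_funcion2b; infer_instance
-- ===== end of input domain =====

-- B builds the rows bottom-up as concatenations of zero blocks around a running power
-- accumulator (no exponentiation, no per-cell branch), then reverses the row list once.

-- ===== PORT A =====
def funcion2b (cant : Int) : List (List Int) :=
  let n := cant
  ((PySem.List.pyRange 0 n 1).foldl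
    (fun (st : List (List Int) × Int) f =>
      let row := (PySem.List.pyRange 0 n 1).foldl
        (fun (r : List Int) c =>
          if c = st.2 then
            r ++ [PySem.Int.floordiv ((3 : Int) ^ (n - 1).toNat) ((3 : Int) ^ f.toNat)]
          else r ++ [0]) []
      (st.1 ++ [row], st.2 - 1))
    ([], n - 1)).1

-- ===== PORT B =====
def funcion2b_alt (cant : Int) : List (List Int) :=
  let n := cant
  let st := (PySem.List.pyRange 0 n 1).foldl
    (fun (st : List (List Int) × Int) c =>
      (st.1 ++ [List.replicate c.toNat (0 : Int) ++ [st.2] ++ List.replicate (n - 1 - c).toNat 0],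
       st.2 * 3))
    ([], 1)
  st.1.reverse

-- ===== PRECONDITION & SPEC =====
def Spec_funcion2b (cant : Int) (out : List (List Int)) : Prop := out = funcion2b_alt cant
instance (cant : Int) (out : List (List Int)) : Decidable (Spec_funcion2b cant out) := by unfold Spec_funcion2b; infer_instance

-- ===== CLAIM (what is proved, stated in full; the proofs are below) =====
def Claim_equal_funcion2b : Prop := ∀ (cant : Int), Dom_funcion2b cant → Spec_funcion2b cant (funcion2b cant)

-- ===== LEMMAS AND PROOFS =====

/-- The common closed form of row `f` of an `m × m` result. -/
def pvRow (m f : Nat) : List Int :=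
  (List.range m).map (fun c => if c = m - 1 - f then (3 : Int) ^ (m - 1 - f) else 0)

/-- B's row built at step `c` (row `m-1-c` of the result). -/
def pvRevRow (m c : Nat) : List Int :=
  List.replicate c (0 : Int) ++ [(3 : Int) ^ c] ++ List.replicate (m - 1 - c) 0

def pvCastList (l : List Nat) : List Int := l.map (fun (j : Nat) => (j : Int))

theorem pvCastList_range_succ (k : Nat) :
    pvCastList (List.range (k + 1)) = pvCastList (List.range k) ++ [(k : Int)] := by
  simp [pvCastList, List.range_succ]

theorem pvPyRange (m : Nat) : PySem.List.pyRange 0 (m : Int) 1 = pvCastList (List.range m) := by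
  rw [PySem.List.pyRange_zero_nat, pvCastList]

theorem pvFoldl_ite_append (i v : Int) (l : List Int) (acc : List Int) :
    l.foldl (fun r c => if c = i then r ++ [v] else r ++ [0]) acc
      = acc ++ l.map (fun c => if c = i then v else 0) := by
  induction l generalizing acc with
  | nil => simp
  | cons x xs ih =>
    simp only [List.foldl_cons, List.map_cons]
    by_cases h : x = i <;> simp [h, ih]

theorem pvPowDiv (m k : Nat) (hk : k < m) :
    PySem.Int.floordiv ((3 : Int) ^ (m - 1)) ((3 : Int) ^ k) = (3 : Int) ^ (m - 1 - k) := by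
  have h1 : ((3 : Int) ^ (m - 1)) = (((3 ^ (m - 1) : Nat)) : Int) := by push_cast; ring
  have h2 : ((3 : Int) ^ k) = (((3 ^ k : Nat)) : Int) := by push_cast; ring
  rw [h1, h2, PySem.Int.floordiv_natCast]
  have h3 : (3 : Nat) ^ (m - 1) / 3 ^ k = 3 ^ (m - 1 - k) :=
    Nat.pow_div (by omega) (by norm_num)
  rw [h3]; push_cast; ring

/-- A's inner loop over a full row, with diagonal index `n-1-k` at outer step `k`. -/
theorem pvInnerA (m k : Nat) (hk : k < m) :
    (pvCastList (List.range m)).foldl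
      (fun (r : List Int) c =>
        if c = (m : Int) - 1 - (k : Int) then
          r ++ [PySem.Int.floordiv ((3 : Int) ^ ((m : Int) - 1).toNat) ((3 : Int) ^ ((k : Int)).toNat)]
        else r ++ [0]) []
      = pvRow m k := by
  rw [pvFoldl_ite_append, List.nil_append, pvCastList, List.map_map, pvRow]
  refine List.map_congr_left ?_
  intro c hc
  rw [List.mem_range] at hc
  have h2 : ((m : Int) - 1).toNat = m - 1 := by omega
  have h3 : ((k : Int)).toNat = k := by omega
  simp only [Function.comp, h2, h3, pvPowDiv m k hk]
  split_ifs <;> first | rfl | omega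

/-- A's outer loop, unrolled `k` steps. -/
theorem pvOuterA (m : Nat) (k : Nat) (hk : k ≤ m) :
    (pvCastList (List.range k)).foldl
      (fun (st : List (List Int) × Int) f =>
        (st.1 ++ [(pvCastList (List.range m)).foldl
          (fun (r : List Int) c =>
            if c = st.2 then
              r ++ [PySem.Int.floordiv ((3 : Int) ^ ((m : Int) - 1).toNat) ((3 : Int) ^ f.toNat)]
            else r ++ [0]) []], st.2 - 1))
      ([], (m : Int) - 1)
      = ((List.range k).map (pvRow m), (m : Int) - 1 - (k : Int)) := by
  induction k with
  | zero => simp [pvCastList]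
  | succ k ih =>
    have hk' : k ≤ m := by omega
    rw [pvCastList_range_succ, List.foldl_append, ih hk']
    simp only [List.foldl_cons, List.foldl_nil]
    have hrow := pvInnerA m k (by omega)
    refine Prod.ext ?_ ?_
    · simp only [List.range_succ, List.map_append, List.map_cons, List.map_nil]
      rw [hrow]
    · simp; ring

/-- B's fold, unrolled `k` steps: rows bottom-up, accumulator `3^k`. -/
theorem pvOuterB (m : Nat) (k : Nat) (hk : k ≤ m) :
    (pvCastList (List.range k)).foldl
      (fun (st : List (List Int) × Int) c =>
        (st.1 ++ [List.replicate c.toNat (0 : Int) ++ [st.2] ++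
          List.replicate ((m : Int) - 1 - c).toNat 0], st.2 * 3))
      ([], 1)
      = ((List.range k).map (pvRevRow m), (3 : Int) ^ k) := by
  induction k with
  | zero => simp [pvCastList]
  | succ k ih =>
    have hk' : k ≤ m := by omega
    rw [pvCastList_range_succ, List.foldl_append, ih hk']
    simp only [List.foldl_cons, List.foldl_nil]
    have h1 : ((k : Int)).toNat = k := by omega
    have h2 : (((m : Int) - 1 - (k : Int))).toNat = m - 1 - k := by omega
    refine Prod.ext ?_ ?_
    · simp only [List.range_succ, List.map_append, List.map_cons, List.map_nil, h1, h2, pvRevRow]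
    · simp; ring

/-- B's row at step `m-1-f` is A's row `f`. -/
theorem pvRevRow_eq (m f : Nat) (hf : f < m) : pvRevRow m (m - 1 - f) = pvRow m f := by
  apply List.ext_getElem
  · simp [pvRevRow, pvRow]; omega
  · intro i h1 h2
    simp only [pvRow, List.getElem_map, List.getElem_range]
    have hmf : m - 1 - (m - 1 - f) = f := by omega
    simp only [pvRevRow, hmf, List.getElem_append, List.length_append, List.length_replicate,
      List.length_cons, List.length_nil]
    split_ifs with p1 p2 p3 <;>
      simp_all [List.getElem_replicate, List.getElem_cons] <;> omega

theorem pvA_eq (cant : Int) : funcion2b cant = (List.range cant.toNat).map (pvRow cant.toNat) := by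
  by_cases h : 0 ≤ cant
  · obtain ⟨m, rfl⟩ : ∃ m : Nat, cant = (m : Int) := ⟨cant.toNat, by omega⟩
    simp only [funcion2b, Int.toNat_natCast]
    rw [pvPyRange, pvOuterA m m le_rfl]
  · have h1 : PySem.List.pyRange 0 cant 1 = [] := PySem.List.pyRange_one_eq_nil (by omega)
    have h2 : cant.toNat = 0 := by omega
    simp [funcion2b, h1, h2]

theorem pvB_eq (cant : Int) :
    funcion2b_alt cant = (List.range cant.toNat).map (pvRow cant.toNat) := by
  by_cases h : 0 ≤ cant
  · obtain ⟨m, rfl⟩ : ∃ m : Nat, cant = (m : Int) := ⟨cant.toNat, by omega⟩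
    simp only [funcion2b_alt, Int.toNat_natCast]
    rw [pvPyRange, pvOuterB m m le_rfl]
    apply List.ext_getElem
    · simp
    · intro i h1 h2
      simp only [List.length_map, List.length_range] at h2
      rw [List.getElem_reverse]
      simp only [List.getElem_map, List.getElem_range, List.length_map, List.length_range]
      rw [pvRevRow_eq m i h2]
  · have h1 : PySem.List.pyRange 0 cant 1 = [] := PySem.List.pyRange_one_eq_nil (by omega)
    have h2 : cant.toNat = 0 := by omega
    simp [funcion2b_alt, h1, h2]

-- ===== VERDICT (by name: the statement is the Claim_ definition above) =====
theorem funcion2b_spec : Claim_equal_funcion2b := by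
  intro cant _
  unfold Spec_funcion2b
  rw [pvA_eq, pvB_eq]
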